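-- pv_equiv track=rewrite | github.com/ujinsong23/video-vote | video_display.py | fetch_batches
-- ===== SOURCE A (Python) =====
-- NUM_PROMPTS = 15
--
-- def fetch_batches(version):
--     batches = {k: [] for k in range(10)}
--     for criteria in range(3):
--         batch_index = criteria
--         for video_index in range(NUM_PROMPTS):
--             batch_index = (batch_index) % 5
--             batches[batch_index].append((video_index, criteria))
--             batch_index += 1
--
--     for criteria in range(3):
--         batch_index = criteria
--         for video_index in range(NUM_PROMPTS):
--             batch_index = (batch_index) % 5
--             batches[batch_index + 5].append((video_index, criteria + 3))
--             batch_index += 1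
--
--     for batch_idx, batch in batches.items():
--         batches[batch_idx] = sorted(batch)
--
--     return batches.get(version, [])
-- ===== SOURCE B (Python) =====
-- NUM_PROMPTS = 15
--
-- def fetch_batches(version):
--     # gather per bucket: pair (v, c) lands in batch (c + v) % 5 (offset +5 / criteria +3 for the second half)
--     batches = {}
--     for b in range(5):
--         batches[b] = sorted((v, c) for c in range(3)
--                             for v in range(NUM_PROMPTS) if (c + v) % 5 == b)
--         batches[b + 5] = sorted((v, c + 3) for c in range(3)
--                                 for v in range(NUM_PROMPTS) if (c + v) % 5 == b)
--     return batches.get(version, [])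
-- ===== Notes on version B (the rewrite author's own statement) =====
-- stated objective: simpler
-- what changed: A scatters each (video, criteria) pair into buckets by carrying an incrementing batch index mod 5 and then re-sorts every bucket; B gathers each bucket directly by filtering with the closed-form condition (criteria + video) % 5 == b, sorting once per bucket.
import Mathlib
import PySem

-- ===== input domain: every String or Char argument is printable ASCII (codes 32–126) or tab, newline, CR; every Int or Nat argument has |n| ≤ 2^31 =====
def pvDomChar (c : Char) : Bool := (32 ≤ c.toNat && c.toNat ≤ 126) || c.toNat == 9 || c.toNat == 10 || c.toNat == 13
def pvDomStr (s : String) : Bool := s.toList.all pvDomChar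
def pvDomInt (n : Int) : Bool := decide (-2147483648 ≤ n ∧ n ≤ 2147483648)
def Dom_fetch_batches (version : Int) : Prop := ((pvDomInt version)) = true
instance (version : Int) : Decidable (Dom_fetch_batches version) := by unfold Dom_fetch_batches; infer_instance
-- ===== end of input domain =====

-- B replaces A's scatter (incrementing batch index mod 5 while appending) by a direct gather
-- per bucket using the closed-form condition (criteria + video) % 5 == b; objective: simpler.

-- ===== PORT A =====
-- the dict A builds: init keys 0..9, two scatter loops carrying (dict, batch_index), then sort each value
def pvBatchesA : PySem.Dict Int (List (Int × Int)) :=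
  let init := (PySem.List.pyRange 0 10 1).foldl
    (fun d k => d.insert k ([] : List (Int × Int))) PySem.Dict.empty
  let d1 := (PySem.List.pyRange 0 3 1).foldl (fun d criteria =>
    ((PySem.List.pyRange 0 15 1).foldl
      (fun (st : PySem.Dict Int (List (Int × Int)) × Int) video_index =>
        let bi := PySem.Int.mod st.2 5
        (st.1.modify bi [] (fun l => l ++ [(video_index, criteria)]), bi + 1))
      (d, criteria)).1) init
  let d2 := (PySem.List.pyRange 0 3 1).foldl (fun d criteria =>
    ((PySem.List.pyRange 0 15 1).foldl
      (fun (st : PySem.Dict Int (List (Int × Int)) × Int) video_index =>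
        let bi := PySem.Int.mod st.2 5
        (st.1.modify (bi + 5) [] (fun l => l ++ [(video_index, criteria + 3)]), bi + 1))
      (d, criteria)).1) d1
  d2.items.foldl
    (fun d kv => d.insert kv.1 (PySem.List.sorted2 kv.2 (fun p => p.1) (fun p => p.2))) d2

def fetch_batches (version : Int) : List (Int × Int) :=
  pvBatchesA.getD version []

-- ===== PORT B =====
-- sorted((v, c + off) for c in range(3) for v in range(15) if (c + v) % 5 == b)
def pvGatherB (off b : Int) : List (Int × Int) :=
  PySem.List.sorted2
    ((PySem.List.pyRange 0 3 1).flatMap (fun c =>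
      (PySem.List.pyRange 0 15 1).filterMap (fun v =>
        if PySem.Int.mod (c + v) 5 == b then some (v, c + off) else none)))
    (fun p => p.1) (fun p => p.2)

def pvBatchesB : PySem.Dict Int (List (Int × Int)) :=
  (PySem.List.pyRange 0 5 1).foldl
    (fun d b => (d.insert b (pvGatherB 0 b)).insert (b + 5) (pvGatherB 3 b))
    PySem.Dict.empty

def fetch_batches_alt (version : Int) : List (Int × Int) :=
  pvBatchesB.getD version []

-- ===== PRECONDITION & SPEC =====
def Spec_fetch_batches (version : Int) (out : List (Int × Int)) : Prop := out = fetch_batches_alt version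
instance (version : Int) (out : List (Int × Int)) : Decidable (Spec_fetch_batches version out) := by unfold Spec_fetch_batches; infer_instance

-- ===== CLAIM (what is proved, stated in full; the proofs are below) =====
def Claim_equal_fetch_batches : Prop := ∀ (version : Int), Dom_fetch_batches version → Spec_fetch_batches version (fetch_batches version)

-- ===== LEMMAS AND PROOFS =====
set_option maxRecDepth 8000 in
theorem pvKeysA : pvBatchesA.keys = [0, 1, 2, 3, 4, 5, 6, 7, 8, 9] := by decide

set_option maxRecDepth 8000 in
theorem pvKeysB : pvBatchesB.keys = [0, 5, 1, 6, 2, 7, 3, 8, 4, 9] := by decide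

set_option maxRecDepth 8000 in
theorem pvGetD_eq (v : Int) : pvBatchesA.getD v [] = pvBatchesB.getD v [] := by
  by_cases h : 0 ≤ v ∧ v < 10
  · obtain ⟨h1, h2⟩ := h
    interval_cases v <;> decide
  · rw [PySem.Dict.getD_of_not_contains, PySem.Dict.getD_of_not_contains]
    · rw [PySem.Dict.contains_eq_decide_mem_keys, pvKeysB]
      simp only [decide_eq_false_iff_not, List.mem_cons, List.not_mem_nil, or_false]
      omega
    · rw [PySem.Dict.contains_eq_decide_mem_keys, pvKeysA]
      simp only [decide_eq_false_iff_not, List.mem_cons, List.not_mem_nil, or_false]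
      omega

-- ===== VERDICT (by name: the statement is the Claim_ definition above) =====
theorem fetch_batches_spec : Claim_equal_fetch_batches := by
  intro version _
  unfold Spec_fetch_batches fetch_batches fetch_batches_alt
  exact pvGetD_eq version
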